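-- pv_equiv track=rewrite | github.com/yllrbill/GenshinLyreMidiPlayer | LyreAutoPlayer/player/quantize.py | quantize_note
-- ===== SOURCE A (Python) =====
-- from typing import List, Tuple, Optional
--
-- def quantize_note(
--     note: int,
--     available: List[int],
--     policy: str,
--     min_note: Optional[int] = None,
--     max_note: Optional[int] = None
-- ) -> Optional[int]:
--     """
--     Quantize a MIDI note to an available note based on policy.
--
--     Args:
--         note: MIDI note number
--         available: List of available MIDI notes
--         policy: Quantization policy:
--             - "drop": Drop notes not in available set
--             - "lower": Map to nearest lower note
--             - "upper": Map to nearest upper note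
--             - "octave": Shift by octave if out of range
--
--     Returns:
--         Quantized MIDI note number or None if dropped
--     """
--     sorted_av = sorted(available)
--     min_av = sorted_av[0]
--     max_av = sorted_av[-1]
--
--     if policy == "octave":
--         if min_note is None:
--             min_note = min_av
--         if max_note is None:
--             max_note = max_av
--         shifted = note
--         if shifted < min_note:
--             while shifted < min_note:
--                 shifted += 12
--         elif shifted > max_note:
--             while shifted > max_note:
--                 shifted -= 12
--         return shifted if shifted in available else None
--
--     if note in available:
--         return note
--
--     if policy == "drop":
--         return None
--
--     if policy == "lower":
--         lowers = [n for n in sorted_av if n <= note]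
--         return lowers[-1] if lowers else sorted_av[0]
--
--     if policy == "upper":
--         uppers = [n for n in sorted_av if n >= note]
--         return uppers[0] if uppers else sorted_av[-1]
--
--     return None
-- ===== SOURCE B (Python) =====
-- from typing import List, Optional
--
-- def quantize_note(
--     note: int,
--     available: List[int],
--     policy: str,
--     min_note: Optional[int] = None,
--     max_note: Optional[int] = None
-- ) -> Optional[int]:
--     # One pass, no sorting: min/max and best-lower/best-upper found directly.
--     lo = min(available)
--     hi = max(available)
--
--     if policy == "octave":
--         if min_note is None:
--             min_note = lo
--         if max_note is None:
--             max_note = hi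
--         shifted = note
--         if shifted < min_note:
--             shifted += 12 * ((min_note - shifted + 11) // 12)
--         elif shifted > max_note:
--             shifted -= 12 * ((shifted - max_note + 11) // 12)
--         return shifted if shifted in available else None
--
--     if note in available:
--         return note
--
--     if policy == "drop":
--         return None
--
--     if policy == "lower":
--         best = None
--         for n in available:
--             if n <= note and (best is None or n > best):
--                 best = n
--         return best if best is not None else lo
--
--     if policy == "upper":
--         best = None
--         for n in available:
--             if n >= note and (best is None or n < best):
--                 best = n
--         return best if best is not None else hi
--
--     return None
-- ===== Notes on version B (the rewrite author's own statement) =====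
-- stated objective: alternative
-- what changed: Drops the sort entirely: min/max and the nearest lower/upper candidates are found by direct one-pass scans, and the two octave-shift while loops are replaced by closed-form //-arithmetic.
import Mathlib
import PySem

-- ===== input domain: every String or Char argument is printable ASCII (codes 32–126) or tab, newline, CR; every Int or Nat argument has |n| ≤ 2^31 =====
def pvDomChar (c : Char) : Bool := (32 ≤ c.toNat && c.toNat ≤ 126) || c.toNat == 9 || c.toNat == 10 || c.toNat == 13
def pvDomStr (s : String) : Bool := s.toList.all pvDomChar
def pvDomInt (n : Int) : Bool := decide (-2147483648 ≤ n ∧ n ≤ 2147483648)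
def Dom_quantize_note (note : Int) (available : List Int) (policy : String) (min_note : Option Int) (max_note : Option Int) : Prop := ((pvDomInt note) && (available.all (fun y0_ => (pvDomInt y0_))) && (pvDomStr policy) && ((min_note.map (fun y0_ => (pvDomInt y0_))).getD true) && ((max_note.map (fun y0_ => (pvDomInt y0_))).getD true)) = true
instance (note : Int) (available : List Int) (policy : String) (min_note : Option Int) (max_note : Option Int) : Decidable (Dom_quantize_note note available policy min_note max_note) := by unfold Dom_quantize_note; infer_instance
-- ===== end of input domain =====

-- B replaces A's sort + linear filter scans + octave while-loops by one-pass min/max/best scans and closed-form arithmetic (objective: alternative).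
-- ===== PORT A =====
-- while shifted < min_note: shifted += 12
def shiftUpA (shifted mn : Int) : Int :=
  if shifted < mn then shiftUpA (shifted + 12) mn else shifted
termination_by (mn - shifted).toNat
decreasing_by omega

-- while shifted > max_note: shifted -= 12
def shiftDownA (shifted mx : Int) : Int :=
  if shifted > mx then shiftDownA (shifted - 12) mx else shifted
termination_by (shifted - mx).toNat
decreasing_by omega

def quantize_note (note : Int) (available : List Int) (policy : String) (min_note : Option Int) (max_note : Option Int) : Option Int :=
  let sorted_av := PySem.List.sorted available (fun x => x) false
  match PySem.List.pyGet? sorted_av 0, PySem.List.pyGet? sorted_av (-1) with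
  | some min_av, some max_av =>
    if policy = "octave" then
      let mn := min_note.getD min_av
      let mx := max_note.getD max_av
      let shifted :=
        if note < mn then shiftUpA note mn
        else if note > mx then shiftDownA note mx
        else note
      if shifted ∈ available then some shifted else none
    else if note ∈ available then some note
    else if policy = "drop" then none
    else if policy = "lower" then
      let lowers := sorted_av.filter (fun n => decide (n ≤ note))
      match lowers.getLast? with
      | some x => some x
      | none => some min_av
    else if policy = "upper" then
      let uppers := sorted_av.filter (fun n => decide (note ≤ n))
      match uppers.head? with
      | some x => some x
      | none => some max_av
    else none
  | _, _ => none   -- empty `available`: Python raises IndexError here (outside Pre_)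

-- ===== PORT B =====
def stepLowerB (note : Int) (best : Option Int) (n : Int) : Option Int :=
  if n ≤ note then
    match best with
    | none => some n
    | some b => if n > b then some n else best
  else best

def stepUpperB (note : Int) (best : Option Int) (n : Int) : Option Int :=
  if note ≤ n then
    match best with
    | none => some n
    | some b => if n < b then some n else best
  else best

def quantize_note_alt (note : Int) (available : List Int) (policy : String) (min_note : Option Int) (max_note : Option Int) : Option Int :=
  (PySem.List.min? available (fun x => x)).bind fun lo =>
  (PySem.List.max? available (fun x => x)).bind fun hi =>
    -- empty `available`: Python raises ValueError at min() (outside Pre_); both binds are `some` otherwise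
    if policy = "octave" then
      let mn := min_note.getD lo
      let mx := max_note.getD hi
      let shifted :=
        if note < mn then note + 12 * (PySem.Int.floordiv (mn - note + 11) 12)
        else if note > mx then note - 12 * (PySem.Int.floordiv (note - mx + 11) 12)
        else note
      if shifted ∈ available then some shifted else none
    else if note ∈ available then some note
    else if policy = "drop" then none
    else if policy = "lower" then
      -- `best if best is not None else lo`
      some ((available.foldl (stepLowerB note) none).getD lo)
    else if policy = "upper" then
      some ((available.foldl (stepUpperB note) none).getD hi)
    else none

-- ===== PRECONDITION & SPEC =====
-- Pre_ excludes only the empty `available`, on which A raises IndexError (and B raises ValueError).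
def Pre_quantize_note (note : Int) (available : List Int) (policy : String) (min_note : Option Int) (max_note : Option Int) : Prop := available ≠ []
instance (note : Int) (available : List Int) (policy : String) (min_note : Option Int) (max_note : Option Int) : Decidable (Pre_quantize_note note available policy min_note max_note) := by unfold Pre_quantize_note; infer_instance

def pvWitness_quantize_note : Int × List Int × String × Option Int × Option Int := (60, [62, 55, 60], "lower", none, none)

def Spec_quantize_note (note : Int) (available : List Int) (policy : String) (min_note : Option Int) (max_note : Option Int) (out : Option Int) : Prop := out = quantize_note_alt note available policy min_note max_note
instance (note : Int) (available : List Int) (policy : String) (min_note : Option Int) (max_note : Option Int) (out : Option Int) : Decidable (Spec_quantize_note note available policy min_note max_note out) := by unfold Spec_quantize_note; infer_instance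

-- ===== CLAIM (what is proved, stated in full; the proofs are below) =====
def Claim_equal_quantize_note : Prop := ∀ (note : Int) (available : List Int) (policy : String) (min_note : Option Int) (max_note : Option Int), Dom_quantize_note note available policy min_note max_note → Pre_quantize_note note available policy min_note max_note → Spec_quantize_note note available policy min_note max_note (quantize_note note available policy min_note max_note)

-- ===== LEMMAS AND PROOFS =====

theorem quantize_note_witness_sane : Dom_quantize_note pvWitness_quantize_note.1 pvWitness_quantize_note.2.1 pvWitness_quantize_note.2.2.1 pvWitness_quantize_note.2.2.2.1 pvWitness_quantize_note.2.2.2.2 ∧ Pre_quantize_note pvWitness_quantize_note.1 pvWitness_quantize_note.2.1 pvWitness_quantize_note.2.2.1 pvWitness_quantize_note.2.2.2.1 pvWitness_quantize_note.2.2.2.2 := by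
  constructor <;> decide

theorem pyGet_zero (l : List Int) : PySem.List.pyGet? l 0 = l.head? := by
  have := PySem.List.pyGet?_natCast l 0
  simpa [List.head?_eq_getElem?] using this

theorem pyGet_neg_one (l : List Int) (h : l ≠ []) : PySem.List.pyGet? l (-1) = l.getLast? := by
  have hl : 0 < l.length := List.length_pos_of_ne_nil h
  simp only [PySem.List.pyGet?, PySem.List.pyIdx?]
  rw [if_neg (by omega), if_pos (by omega)]
  have h2 : l.length - (-(-1:Int)).toNat = l.length - 1 := by norm_num
  rw [h2, Option.bind_some, List.getLast?_eq_getElem?]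

theorem floordiv12 (x : Int) : PySem.Int.floordiv x 12 = x / 12 := by
  simp [PySem.Int.floordiv, Int.fdiv_eq_ediv]

theorem shiftUpA_eq (note mn : Int) (h : note < mn) :
    shiftUpA note mn = note + 12 * ((mn - note + 11) / 12) := by
  by_cases h2 : note + 12 < mn
  · have ih := shiftUpA_eq (note + 12) mn h2
    rw [shiftUpA, if_pos h, ih]
    omega
  · rw [shiftUpA, if_pos h, shiftUpA, if_neg h2]
    omega
termination_by (mn - note).toNat
decreasing_by omega

theorem shiftDownA_eq (note mx : Int) (h : note > mx) :
    shiftDownA note mx = note - 12 * ((note - mx + 11) / 12) := by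
  by_cases h2 : note - 12 > mx
  · have ih := shiftDownA_eq (note - 12) mx h2
    rw [shiftDownA, if_pos h, ih]
    omega
  · rw [shiftDownA, if_pos h, shiftDownA, if_neg h2]
    omega
termination_by (note - mx).toNat
decreasing_by omega

theorem pairwise_last : ∀ (l : List Int), l.Pairwise (· ≤ ·) → ∀ M : Int,
    l.getLast? = some M → ∀ x ∈ l, x ≤ M := by
  intro l
  induction l with
  | nil => intro _ M hM; simp at hM
  | cons a t ih =>
    intro hp M hM x hx
    rw [List.pairwise_cons] at hp
    rcases t with _ | ⟨b, t'⟩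
    · simp at hM hx; omega
    · rw [List.getLast?_cons_cons] at hM
      rw [List.mem_cons] at hx
      rcases hx with rfl | hx
      · exact hp.1 _ (List.mem_of_getLast? hM)
      · exact ih hp.2 M hM x hx

theorem pairwise_head {l : List Int} (hp : l.Pairwise (· ≤ ·)) {m : Int}
    (hm : l.head? = some m) : ∀ x ∈ l, m ≤ x := by
  rcases l with _ | ⟨a, t⟩
  · simp at hm
  · simp at hm; subst hm
    rw [List.pairwise_cons] at hp
    intro x hx
    rw [List.mem_cons] at hx
    rcases hx with rfl | hx
    · exact le_rfl
    · exact hp.1 _ hx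

theorem foldl_min_spec (t : List Int) (a : Int) :
    t.foldl min a ≤ a ∧ ∀ y ∈ t, t.foldl min a ≤ y := by
  induction t generalizing a with
  | nil => simp
  | cons b t ih =>
    rcases ih (min a b) with ⟨h1, h2⟩
    refine ⟨le_trans h1 (by omega), ?_⟩
    intro y hy
    rw [List.mem_cons] at hy
    rcases hy with rfl | hy
    · exact le_trans h1 (by omega)
    · exact h2 _ hy

theorem foldl_min_mem (t : List Int) (a : Int) :
    t.foldl min a = a ∨ t.foldl min a ∈ t := by
  induction t generalizing a with
  | nil => simp
  | cons b t ih =>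
    rcases ih (min a b) with h | h
    · rcases le_or_gt a b with hab | hab
      · left; simpa [min_eq_left hab] using h
      · right; rw [List.foldl_cons, h]; simp [min_eq_right hab.le]
    · right; exact List.mem_cons_of_mem _ h

theorem stepLower_some (note b n : Int) :
    stepLowerB note (some b) n = some (if n ≤ note then max b n else b) := by
  unfold stepLowerB
  by_cases h : n ≤ note
  · simp only [if_pos h]
    by_cases h2 : n > b
    · rw [if_pos h2]; congr 1; omega
    · rw [if_neg h2]; congr 1; omega
  · simp [h]

theorem stepUpper_some (note b n : Int) :
    stepUpperB note (some b) n = some (if note ≤ n then min b n else b) := by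
  unfold stepUpperB
  by_cases h : note ≤ n
  · simp only [if_pos h]
    by_cases h2 : n < b
    · rw [if_pos h2]; congr 1; omega
    · rw [if_neg h2]; congr 1; omega
  · simp [h]

theorem foldLower_some (note : Int) (l : List Int) (b : Int) :
    l.foldl (stepLowerB note) (some b) =
      some ((l.filter (fun n => decide (n ≤ note))).foldl max b) := by
  induction l generalizing b with
  | nil => rfl
  | cons n l ih =>
    rw [List.foldl_cons, stepLower_some]
    by_cases h : n ≤ note
    · simp [h, ih]
    · simp [h, ih]

theorem foldUpper_some (note : Int) (l : List Int) (b : Int) :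
    l.foldl (stepUpperB note) (some b) =
      some ((l.filter (fun n => decide (note ≤ n))).foldl min b) := by
  induction l generalizing b with
  | nil => rfl
  | cons n l ih =>
    rw [List.foldl_cons, stepUpper_some]
    by_cases h : note ≤ n
    · simp [h, ih]
    · simp [h, ih]

theorem foldLower_none (note : Int) (l : List Int) :
    l.foldl (stepLowerB note) none =
      match l.filter (fun n => decide (n ≤ note)) with
      | [] => none
      | c :: cs => some (cs.foldl max c) := by
  induction l with
  | nil => rfl
  | cons n l ih =>
    rw [List.foldl_cons]
    by_cases h : n ≤ note
    · have : stepLowerB note none n = some n := by simp [stepLowerB, h]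
      rw [this, foldLower_some]
      simp [h]
    · have : stepLowerB note none n = none := by simp [stepLowerB, h]
      rw [this, ih]
      simp [h]

theorem foldUpper_none (note : Int) (l : List Int) :
    l.foldl (stepUpperB note) none =
      match l.filter (fun n => decide (note ≤ n)) with
      | [] => none
      | c :: cs => some (cs.foldl min c) := by
  induction l with
  | nil => rfl
  | cons n l ih =>
    rw [List.foldl_cons]
    by_cases h : note ≤ n
    · have : stepUpperB note none n = some n := by simp [stepUpperB, h]
      rw [this, foldUpper_some]
      simp [h]
    · have : stepUpperB note none n = none := by simp [stepUpperB, h]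
      rw [this, ih]
      simp [h]

-- ===== VERDICT (by name: the statement is the Claim_ definition above) =====
theorem quantize_note_spec : Claim_equal_quantize_note := by
  intro note available policy min_note max_note _ hpre
  unfold Pre_quantize_note at hpre
  unfold Spec_quantize_note quantize_note quantize_note_alt
  have hsne : PySem.List.sorted available (fun x => x) false ≠ [] := by
    intro hcon
    exact hpre ((PySem.List.sorted_eq_nil_iff _ _ _).mp hcon)
  set s := PySem.List.sorted available (fun x => x) false with hs_def
  have hperm : s.Perm available := PySem.List.sorted_perm available (fun x => x) false
  have hpair : s.Pairwise (· ≤ ·) := PySem.List.sorted_pairwise available (fun x => x)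
  obtain ⟨m, ts, hs⟩ := List.exists_cons_of_ne_nil hsne
  obtain ⟨M, hM⟩ : ∃ M, s.getLast? = some M := by
    cases hg : s.getLast? with
    | none => exact absurd (List.getLast?_eq_none_iff.mp hg) hsne
    | some M => exact ⟨M, rfl⟩
  obtain ⟨lo, hlo⟩ : ∃ lo, PySem.List.min? available (fun x => x) = some lo := by
    cases hg : PySem.List.min? available (fun x => x) with
    | none => exact absurd ((PySem.List.min?_eq_none_iff _ _).mp hg) hpre
    | some lo => exact ⟨lo, rfl⟩
  obtain ⟨hi, hhi⟩ : ∃ hi, PySem.List.max? available (fun x => x) = some hi := by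
    cases hg : PySem.List.max? available (fun x => x) with
    | none => exact absurd ((PySem.List.max?_eq_none_iff _ _).mp hg) hpre
    | some hi => exact ⟨hi, rfl⟩
  have hmlo : m = lo := by
    have h1 : m ≤ lo := PySem.List.key_head_sorted_le available (fun x => x) hs lo (PySem.List.min?_mem hlo)
    have hmmem : m ∈ s := by rw [hs]; exact List.mem_cons_self
    have h2 : lo ≤ m := PySem.List.min?_isMin hlo m (hperm.mem_iff.mp hmmem)
    omega
  have hMhi : M = hi := by
    have h1 : M ≤ hi := PySem.List.max?_isMax hhi M (hperm.mem_iff.mp (List.mem_of_getLast? hM))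
    have h2 : hi ≤ M := pairwise_last s hpair M hM hi (hperm.mem_iff.mpr (PySem.List.max?_mem hhi))
    omega
  have h0 : PySem.List.pyGet? s 0 = some m := by rw [pyGet_zero, hs]; rfl
  have h1 : PySem.List.pyGet? s (-1) = some M := by rw [pyGet_neg_one _ hsne, hM]
  simp only [h0, h1, hlo, hhi, Option.bind_some]
  rw [← hmlo, ← hMhi]
  by_cases hoct : policy = "octave"
  · simp only [if_pos hoct]
    have hshift :
        (if note < min_note.getD m then shiftUpA note (min_note.getD m)
         else if note > max_note.getD M then shiftDownA note (max_note.getD M) else note) =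
        (if note < min_note.getD m then note + 12 * (PySem.Int.floordiv (min_note.getD m - note + 11) 12)
         else if note > max_note.getD M then note - 12 * (PySem.Int.floordiv (note - max_note.getD M + 11) 12)
         else note) := by
      by_cases hlt : note < min_note.getD m
      · rw [if_pos hlt, if_pos hlt, shiftUpA_eq _ _ hlt, floordiv12]
      · rw [if_neg hlt, if_neg hlt]
        by_cases hgt : note > max_note.getD M
        · rw [if_pos hgt, if_pos hgt, shiftDownA_eq _ _ hgt, floordiv12]
        · rw [if_neg hgt, if_neg hgt]
    rw [hshift]
  · simp only [if_neg hoct]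
    by_cases hmem : note ∈ available
    · simp only [if_pos hmem]
    · simp only [if_neg hmem]
      by_cases hdrop : policy = "drop"
      · simp only [if_pos hdrop]
      · simp only [if_neg hdrop]
        by_cases hlow : policy = "lower"
        · simp only [if_pos hlow]
          rw [foldLower_none]
          have hpf : (s.filter (fun n => decide (n ≤ note))).Perm
              (available.filter (fun n => decide (n ≤ note))) := hperm.filter _
          cases hf : (s.filter (fun n => decide (n ≤ note))).getLast? with
          | none =>
            have hnil : s.filter (fun n => decide (n ≤ note)) = [] :=
              List.getLast?_eq_none_iff.mp hf
            have : available.filter (fun n => decide (n ≤ note)) = [] :=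
              ((hnil ▸ hpf).symm).eq_nil
            rw [this]
            simp
          | some x =>
            have hxmem : x ∈ s.filter (fun n => decide (n ≤ note)) := List.mem_of_getLast? hf
            have hxmax : ∀ y ∈ available.filter (fun n => decide (n ≤ note)), y ≤ x := by
              intro y hy
              exact pairwise_last _ (hpair.filter _) x hf y (hpf.mem_iff.mpr hy)
            cases hfa : available.filter (fun n => decide (n ≤ note)) with
            | nil =>
              exact absurd (hpf.mem_iff.mp hxmem) (by simp [hfa])
            | cons c cs =>
              have hv1 : cs.foldl max c ≤ x := by
                rcases PySem.List.foldl_max_mem cs c with h | h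
                · exact hxmax _ (by rw [hfa, h]; exact List.mem_cons_self)
                · exact hxmax _ (by rw [hfa]; exact List.mem_cons_of_mem _ h)
              have hv2 : x ≤ cs.foldl max c := by
                rcases PySem.List.le_foldl_max cs c with ⟨ha, hb⟩
                have hxm : x ∈ c :: cs := hfa ▸ hpf.mem_iff.mp hxmem
                rw [List.mem_cons] at hxm
                rcases hxm with rfl | hxm
                · exact ha
                · exact hb _ hxm
              have : cs.foldl max c = x := le_antisymm hv1 hv2
              simp [this]
        · simp only [if_neg hlow]
          by_cases hup : policy = "upper"
          · simp only [if_pos hup]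
            rw [foldUpper_none]
            have hpf : (s.filter (fun n => decide (note ≤ n))).Perm
                (available.filter (fun n => decide (note ≤ n))) := hperm.filter _
            cases hf : (s.filter (fun n => decide (note ≤ n))).head? with
            | none =>
              have hnil : s.filter (fun n => decide (note ≤ n)) = [] :=
                List.head?_eq_none_iff.mp hf
              have : available.filter (fun n => decide (note ≤ n)) = [] :=
                ((hnil ▸ hpf).symm).eq_nil
              rw [this]
              simp
            | some x =>
              have hxmem : x ∈ s.filter (fun n => decide (note ≤ n)) := List.mem_of_head? hf
              have hxmin : ∀ y ∈ available.filter (fun n => decide (note ≤ n)), x ≤ y := by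
                intro y hy
                exact pairwise_head (hpair.filter _) hf y (hpf.mem_iff.mpr hy)
              cases hfa : available.filter (fun n => decide (note ≤ n)) with
              | nil =>
                exact absurd (hpf.mem_iff.mp hxmem) (by simp [hfa])
              | cons c cs =>
                have hv1 : x ≤ cs.foldl min c := by
                  rcases foldl_min_mem cs c with h | h
                  · exact hxmin _ (by rw [hfa, h]; exact List.mem_cons_self)
                  · exact hxmin _ (by rw [hfa]; exact List.mem_cons_of_mem _ h)
                have hv2 : cs.foldl min c ≤ x := by
                  rcases foldl_min_spec cs c with ⟨ha, hb⟩
                  have hxm : x ∈ c :: cs := hfa ▸ hpf.mem_iff.mp hxmem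
                  rw [List.mem_cons] at hxm
                  rcases hxm with rfl | hxm
                  · exact ha
                  · exact hb _ hxm
                have : cs.foldl min c = x := le_antisymm hv2 hv1
                simp [this]
          · simp only [if_neg hup]
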